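-- pv_equiv track=rewrite | github.com/mengjihua/Binary-Battle | 贪心与思维/贪心/反悔贪心/LCP 30.py | magicTower
-- ===== SOURCE A (Python) =====
-- from typing import List, Tuple, Dict, Set, Optional
-- from heapq import heappush, heappop, heapify, nsmallest, nlargest
--
-- def magicTower(nums: List[int]) -> int:
--     if sum(nums) + 1 <= 0: return -1
--
--     heap = []
--     sm = 1
--     regret_cnt = 0
--     for num in nums:
--         sm += num
--         if num < 0: heappush(heap, num)
--         while heap and sm <= 0:
--             sm -= heappop(heap)
--             regret_cnt += 1
--     return regret_cnt
-- ===== SOURCE B (Python) =====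
-- def magicTower(nums):
--     if sum(nums) + 1 <= 0:
--         return -1
--     pool = []          # plain list of the negative values seen so far (no heap order)
--     sm = 1
--     regret_cnt = 0
--     for num in nums:
--         sm += num
--         if num < 0:
--             pool.append(num)
--         while pool and sm <= 0:
--             m = pool[0]
--             for v in pool:          # linear scan for the most negative element
--                 if v < m:
--                     m = v
--             pool.remove(m)
--             sm -= m
--             regret_cnt += 1
--     return regret_cnt
-- ===== Notes on version B (the rewrite author's own statement) =====
-- stated objective: alternative
-- what changed: Replaces the heapq min-heap with a plain unordered list of the negative values, extracting the most negative element per regret by a linear scan-and-remove instead of heappop.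
import Mathlib
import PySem

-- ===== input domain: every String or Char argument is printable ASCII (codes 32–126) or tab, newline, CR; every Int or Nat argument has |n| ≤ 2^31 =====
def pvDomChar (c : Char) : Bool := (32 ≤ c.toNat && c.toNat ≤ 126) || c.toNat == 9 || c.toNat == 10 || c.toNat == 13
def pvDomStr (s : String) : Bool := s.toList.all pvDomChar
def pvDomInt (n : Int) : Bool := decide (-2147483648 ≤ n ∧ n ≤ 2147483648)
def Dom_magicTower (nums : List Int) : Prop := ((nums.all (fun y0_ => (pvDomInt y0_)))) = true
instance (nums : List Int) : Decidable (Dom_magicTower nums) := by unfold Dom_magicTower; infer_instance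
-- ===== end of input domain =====

-- B replaces A's heapq min-heap by an unordered list with a linear min-scan per pop: an
-- alternative data-structure strategy, not faster.

-- ===== PORT A =====
-- heapq is modelled by a sorted list: heappush = ordered insert, heappop = take the head.
-- This is exact for this program: heappop returns the minimum of the heap's Int values and
-- only the popped values (never the heap array's layout) are observed.
def heapPush (h : List Int) (x : Int) : List Int :=
  match h with
  | [] => [x]
  | y :: ys => if x ≤ y then x :: y :: ys else y :: heapPush ys x

-- 'while heap and sm <= 0: sm -= heappop(heap); regret_cnt += 1'
def drainA : List Int → Int → Int → (List Int × Int × Int)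
  | [], sm, cnt => ([], sm, cnt)
  | x :: h, sm, cnt => if sm ≤ 0 then drainA h (sm - x) (cnt + 1) else (x :: h, sm, cnt)

def magicTower (nums : List Int) : Int :=
  if nums.sum + 1 ≤ 0 then -1
  else
    (nums.foldl
      (fun st num =>
        let sm := st.2.1 + num
        let h := if num < 0 then heapPush st.1 num else st.1
        drainA h sm st.2.2)
      (([] : List Int), (1 : Int), (0 : Int))).2.2

-- ===== PORT B =====
-- the inner 'm = pool[0]; for v in pool: if v < m: m = v' scan
def scanMin (x : Int) (p : List Int) : Int :=
  p.foldl (fun m v => if v < m then v else m) x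

-- literal pool.remove(m): drop the first occurrence
def removeFirst : List Int → Int → List Int
  | [], _ => []
  | y :: ys, m => if y = m then ys else y :: removeFirst ys m

-- 'while pool and sm <= 0: m = scan-min; pool.remove(m); sm -= m; regret_cnt += 1'
-- structural recursion on a fuel ≥ pool length (each iteration removes one element,
-- so the fuel-exhausted branch is never reached from drainB: a pure totalization guard)
def drainBF : Nat → List Int → Int → Int → (List Int × Int × Int)
  | 0, p, sm, cnt => (p, sm, cnt)
  | _ + 1, [], sm, cnt => ([], sm, cnt)
  | f + 1, x :: q, sm, cnt =>
    if sm ≤ 0 then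
      drainBF f (removeFirst (x :: q) (scanMin x q)) (sm - scanMin x q) (cnt + 1)
    else (x :: q, sm, cnt)

def drainB (p : List Int) (sm cnt : Int) : (List Int × Int × Int) :=
  drainBF p.length p sm cnt

def magicTower_alt (nums : List Int) : Int :=
  if nums.sum + 1 ≤ 0 then -1
  else
    (nums.foldl
      (fun st num =>
        let sm := st.2.1 + num
        let p := if num < 0 then st.1 ++ [num] else st.1
        drainB p sm st.2.2)
      (([] : List Int), (1 : Int), (0 : Int))).2.2

-- ===== PRECONDITION & SPEC =====
def Spec_magicTower (nums : List Int) (out : Int) : Prop := out = magicTower_alt nums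
instance (nums : List Int) (out : Int) : Decidable (Spec_magicTower nums out) := by unfold Spec_magicTower; infer_instance

-- ===== CLAIM (what is proved, stated in full; the proofs are below) =====
def Claim_equal_magicTower : Prop := ∀ (nums : List Int), Dom_magicTower nums → Spec_magicTower nums (magicTower nums)

-- ===== LEMMAS AND PROOFS =====

theorem scanMin_mem (x : Int) (p : List Int) : scanMin x p ∈ x :: p := by
  induction p generalizing x with
  | nil => simp [scanMin]
  | cons v vs ih =>
    have hstep : scanMin x (v :: vs) = scanMin (if v < x then v else x) vs := rfl
    rw [hstep]
    rcases List.mem_cons.mp (ih (if v < x then v else x)) with he | hm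
    · rw [he]
      split
      · exact List.mem_cons_of_mem _ (List.mem_cons_self ..)
      · exact List.mem_cons_self ..
    · exact List.mem_cons_of_mem _ (List.mem_cons_of_mem _ hm)

theorem scanMin_le (x : Int) (p : List Int) : ∀ y ∈ x :: p, scanMin x p ≤ y := by
  induction p generalizing x with
  | nil => intro y hy; simp only [List.mem_cons, List.not_mem_nil, or_false] at hy
           simp [scanMin, hy]
  | cons v vs ih =>
    intro y hy
    have hstep : scanMin x (v :: vs) = scanMin (if v < x then v else x) vs := rfl
    rw [hstep]
    have hminx : scanMin (if v < x then v else x) vs ≤ (if v < x then v else x) :=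
      ih _ _ (List.mem_cons_self ..)
    rcases List.mem_cons.mp hy with rfl | hy'
    · by_cases hvx : v < y
      · exact le_trans (by simpa [hvx] using hminx) (le_of_lt hvx)
      · simpa [hvx] using hminx
    · rcases List.mem_cons.mp hy' with rfl | hy''
      · by_cases hvx : y < x
        · simpa [hvx] using hminx
        · exact le_trans (by simpa [hvx] using hminx) (not_lt.mp hvx)
      · exact ih _ _ (List.mem_cons_of_mem _ hy'')

theorem removeFirst_eq_erase (l : List Int) (m : Int) : removeFirst l m = l.erase m := by
  induction l with
  | nil => simp [removeFirst]
  | cons y ys ih =>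
    by_cases h : y = m
    · simp [removeFirst, h]
    · simp [removeFirst, h, (beq_eq_false_iff_ne ..).mpr h, ih]

theorem heapPush_perm (h : List Int) (x : Int) : (heapPush h x).Perm (x :: h) := by
  induction h with
  | nil => simp [heapPush]
  | cons y ys ih =>
    by_cases hc : x ≤ y
    · simp [heapPush, hc]
    · simp only [heapPush, if_neg hc]
      exact ((ih.cons y).trans (List.Perm.swap x y ys))

theorem heapPush_sorted {h : List Int} (hs : h.Pairwise (· ≤ ·)) (x : Int) :
    (heapPush h x).Pairwise (· ≤ ·) := by
  induction h with
  | nil => simp [heapPush]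
  | cons y ys ih =>
    rcases List.pairwise_cons.mp hs with ⟨hy, hys⟩
    by_cases hc : x ≤ y
    · simp only [heapPush, if_pos hc, List.pairwise_cons]
      refine ⟨?_, hy, hys⟩
      intro b hb
      rcases List.mem_cons.mp hb with rfl | hb'
      · exact hc
      · exact le_trans hc (hy b hb')
    · simp only [heapPush, if_neg hc, List.pairwise_cons]
      refine ⟨?_, ih hys⟩
      intro b hb
      rcases List.mem_cons.mp ((heapPush_perm ys x).mem_iff.mp hb) with rfl | h'
      · exact le_of_lt (not_le.mp hc)
      · exact hy b h'

theorem drain_eq : ∀ (f : Nat) (h p : List Int) (sm cnt : Int),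
    p.length ≤ f → h.Pairwise (· ≤ ·) → h.Perm p →
    (drainA h sm cnt).1.Pairwise (· ≤ ·) ∧ (drainA h sm cnt).1.Perm (drainBF f p sm cnt).1 ∧
    (drainA h sm cnt).2 = (drainBF f p sm cnt).2 := by
  intro f
  induction f with
  | zero =>
    intro h p sm cnt hn hs hperm
    have p0 : p = [] := List.eq_nil_of_length_eq_zero (Nat.le_zero.mp hn)
    subst p0
    have h0 : h = [] := hperm.eq_nil
    subst h0
    simp [drainA, drainBF]
  | succ f ih =>
    intro h p sm cnt hn hs hperm
    match h with
    | [] =>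
      have p0 : p = [] := (hperm.symm).eq_nil
      subst p0
      simp [drainA, drainBF]
    | x :: h' =>
      match p with
      | [] => exact absurd hperm.length_eq (by simp)
      | y :: q =>
        by_cases hsm : sm ≤ 0
        · -- both pop the minimum, which is x
          have hxmin : ∀ z ∈ x :: h', x ≤ z := by
            intro z hz
            rcases List.mem_cons.mp hz with rfl | hz'
            · exact le_rfl
            · exact (List.pairwise_cons.mp hs).1 z hz'
          have hmx : scanMin y q = x := by
            have h1 : x ≤ scanMin y q := hxmin _ (hperm.mem_iff.mpr (scanMin_mem y q))
            have h2 : scanMin y q ≤ x := scanMin_le y q x (hperm.mem_iff.mp (List.mem_cons_self ..))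
            omega
          have hxmem : x ∈ y :: q := hperm.mem_iff.mp (List.mem_cons_self ..)
          have hperm' : h'.Perm (removeFirst (y :: q) x) := by
            rw [removeFirst_eq_erase]
            exact (List.perm_cons x).mp (hperm.trans (List.perm_cons_erase hxmem))
          have hs' : h'.Pairwise (· ≤ ·) := (List.pairwise_cons.mp hs).2
          have hlen : (removeFirst (y :: q) x).length ≤ f := by
            have h1 := hperm'.length_eq
            have h2 := hperm.length_eq
            simp only [List.length_cons] at h2 hn
            omega
          have hrec := ih h' (removeFirst (y :: q) x) (sm - x) (cnt + 1) hlen hs' hperm'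
          simp only [drainA, drainBF]
          rw [if_pos hsm, if_pos hsm, hmx]
          exact hrec
        · simp only [drainA, drainBF]
          rw [if_neg hsm, if_neg hsm]
          exact ⟨hs, hperm, rfl⟩

theorem loop_eq (nums : List Int) :
    ∀ (h p : List Int) (sm cnt : Int), h.Pairwise (· ≤ ·) → h.Perm p →
    (nums.foldl (fun st num =>
        let sm := st.2.1 + num
        let h := if num < 0 then heapPush st.1 num else st.1
        drainA h sm st.2.2) (h, sm, cnt)).2 =
    (nums.foldl (fun st num =>
        let sm := st.2.1 + num
        let p := if num < 0 then st.1 ++ [num] else st.1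
        drainB p sm st.2.2) (p, sm, cnt)).2 := by
  induction nums with
  | nil => intro h p sm cnt hs hperm; rfl
  | cons num rest ih =>
    intro h p sm cnt hs hperm
    simp only [List.foldl]
    have hs1 : (if num < 0 then heapPush h num else h).Pairwise (· ≤ ·) := by
      split
      · exact heapPush_sorted hs num
      · exact hs
    have hperm1 : (if num < 0 then heapPush h num else h).Perm
        (if num < 0 then p ++ [num] else p) := by
      split
      · exact (heapPush_perm h num).trans
          ((hperm.cons num).trans (List.perm_append_singleton num p).symm)
      · exact hperm
    obtain ⟨hds, hdp, hde⟩ := drain_eq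
      (if num < 0 then p ++ [num] else p).length
      (if num < 0 then heapPush h num else h) (if num < 0 then p ++ [num] else p)
      (sm + num) cnt le_rfl hs1 hperm1
    have hmk : drainB (if num < 0 then p ++ [num] else p) (sm + num) cnt =
        ((drainB (if num < 0 then p ++ [num] else p) (sm + num) cnt).1,
         (drainA (if num < 0 then heapPush h num else h) (sm + num) cnt).2.1,
         (drainA (if num < 0 then heapPush h num else h) (sm + num) cnt).2.2) := by
      rw [show (drainA (if num < 0 then heapPush h num else h) (sm + num) cnt).2 =
            (drainB (if num < 0 then p ++ [num] else p) (sm + num) cnt).2 from hde]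
    rw [hmk]
    exact ih (drainA (if num < 0 then heapPush h num else h) (sm + num) cnt).1
      (drainB (if num < 0 then p ++ [num] else p) (sm + num) cnt).1
      (drainA (if num < 0 then heapPush h num else h) (sm + num) cnt).2.1
      (drainA (if num < 0 then heapPush h num else h) (sm + num) cnt).2.2
      hds hdp

-- ===== VERDICT (by name: the statement is the Claim_ definition above) =====
theorem magicTower_spec : Claim_equal_magicTower := by
  intro nums _
  unfold Spec_magicTower magicTower magicTower_alt
  by_cases hg : nums.sum + 1 ≤ 0
  · rw [if_pos hg, if_pos hg]
  · rw [if_neg hg, if_neg hg]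
    rw [loop_eq nums [] [] 1 0 List.Pairwise.nil (List.Perm.refl _)]
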